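-- pv_equiv track=rewrite | github.com/backHirasawa/OB_score | prev/generate.py | culc_race_lane
-- ===== SOURCE A (Python) =====
-- def culc_race_lane(num):
--     num_list = []
--     lane = 6
--     while num != 0:
--         # 以下 lane = 6 の例
--         # もし参加者が12人以上なら
--         if num >= 2*lane:
--             num_list.append(lane)
--             num = num - lane
--         # 参加者が7~11人なら
--         elif lane < num:
--             # もし参加者が偶数
--             if num % 2 == 0:
--                 num = int(num/2)
--                 num_list.append(num)
--                 num_list.append(num)
--             # 奇数
--             else:
--                 num = int(num/2)
--                 num_list.append(num+1)
--                 num_list.append(num)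
--             num = 0
--         # 参加者が1~6人なら
--         else:
--             num_list.append(num)
--             num = 0
--
--     num_list.reverse()
--     return num_list
-- ===== SOURCE B (Python) =====
-- def culc_race_lane(num):
--     if num == 0:
--         return []
--     if num < 7:
--         return [num]
--     q, r = divmod(num, 6)
--     if r == 0:
--         return [6] * q
--     s = r + 6
--     return [s // 2, s - s // 2] + [6] * (q - 1)
-- ===== Notes on version B (the rewrite author's own statement) =====
-- stated objective: simpler
-- what changed: Replaces the repeated-6-subtraction while loop with appends plus a final reverse by one divmod: [6]*q for exact multiples, otherwise a near-even split of the last 7..11 participants followed by [6]*(q-1); small and negative counts are handled by direct returns.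
import Mathlib
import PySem

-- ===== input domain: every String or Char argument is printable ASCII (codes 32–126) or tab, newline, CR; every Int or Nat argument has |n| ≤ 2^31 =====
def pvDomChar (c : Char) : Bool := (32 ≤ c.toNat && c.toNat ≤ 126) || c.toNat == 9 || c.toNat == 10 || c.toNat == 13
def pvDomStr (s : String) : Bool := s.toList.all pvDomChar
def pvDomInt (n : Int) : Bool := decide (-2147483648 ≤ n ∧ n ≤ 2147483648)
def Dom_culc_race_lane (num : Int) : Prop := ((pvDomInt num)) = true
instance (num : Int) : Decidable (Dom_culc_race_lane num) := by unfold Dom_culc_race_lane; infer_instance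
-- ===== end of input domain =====

-- B replaces A's repeated 6-subtraction loop (plus final reverse) by one divmod and direct list construction; objective: simpler.

-- ===== PORT A =====
-- the while loop: acc is num_list so far (in append order); the final reverse is in culc_race_lane.
-- Python's int(num/2) truncates toward zero; it is only reached for 6 < num < 12, where it equals num / 2.
def culcLoopA (num : Int) (acc : List Int) : List Int :=
  if _h0 : num ≠ 0 then
    if _h1 : num ≥ 2 * 6 then
      culcLoopA (num - 6) (acc ++ [6])
    else if 6 < num then
      let half := num / 2
      if PySem.Int.mod num 2 = 0 then acc ++ [half, half]
      else acc ++ [half + 1, half]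
    else acc ++ [num]
  else acc
termination_by num.toNat
decreasing_by omega

def culc_race_lane (num : Int) : List Int := (culcLoopA num []).reverse

-- ===== PORT B =====
def culc_race_lane_alt (num : Int) : List Int :=
  if num = 0 then []
  else if num < 7 then [num]
  else
    let q := PySem.Int.floordiv num 6
    let r := PySem.Int.mod num 6
    if r = 0 then List.replicate q.toNat 6
    else
      let s := r + 6
      [PySem.Int.floordiv s 2, s - PySem.Int.floordiv s 2] ++ List.replicate (q - 1).toNat 6

-- ===== PRECONDITION & SPEC =====
def Spec_culc_race_lane (num : Int) (out : List Int) : Prop := out = culc_race_lane_alt num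
instance (num : Int) (out : List Int) : Decidable (Spec_culc_race_lane num out) := by unfold Spec_culc_race_lane; infer_instance

-- ===== CLAIM (what is proved, stated in full; the proofs are below) =====
def Claim_equal_culc_race_lane : Prop := ∀ (num : Int), Dom_culc_race_lane num → Spec_culc_race_lane num (culc_race_lane num)

-- ===== LEMMAS AND PROOFS =====

-- B's output satisfies the step equation of A's loop: peeling 6 off num appends a 6.
lemma alt_step (num : Int) (h : num ≥ 12) :
    culc_race_lane_alt num = culc_race_lane_alt (num - 6) ++ [6] := by
  rcases lt_or_ge num 13 with h13 | h13
  · have : num = 12 := by omega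
    subst this; decide
  · have h6 : (0:Int) < 6 := by norm_num
    have h2 : (0:Int) < 2 := by norm_num
    unfold culc_race_lane_alt
    simp only [PySem.Int.floordiv_eq_ediv_of_pos h6, PySem.Int.mod_eq_emod_of_pos h6,
      PySem.Int.floordiv_eq_ediv_of_pos h2]
    have hrm : num % 6 = (num - 6) % 6 := by omega
    split_ifs with c1 c2 c3 c4 c5 c6 <;> try omega
    · rw [show (num / 6).toNat = ((num - 6) / 6).toNat + 1 from by omega,
        List.replicate_succ']
    · rw [hrm, show (num / 6 - 1).toNat = ((num - 6) / 6 - 1).toNat + 1 from by omega,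
        List.replicate_succ', ← List.append_assoc]

-- A's loop accumulates B's answer in reverse after the accumulator.
lemma culcLoopA_eq (num : Int) (acc : List Int) :
    culcLoopA num acc = acc ++ (culc_race_lane_alt num).reverse := by
  rw [culcLoopA]
  split_ifs with c1 c2 c3 c4
  · -- num ≥ 12: recurse, use alt_step
    rw [culcLoopA_eq (num - 6), alt_step num (by omega), List.reverse_append,
      List.append_assoc]
    simp
  · -- 6 < num < 12, even
    have h2 : (0:Int) < 2 := by norm_num
    have hm : num % 2 = 0 := by
      have := c4; simpa [PySem.Int.mod_eq_emod_of_pos h2] using this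
    unfold culc_race_lane_alt
    have h6 : (0:Int) < 6 := by norm_num
    simp only [PySem.Int.floordiv_eq_ediv_of_pos h6, PySem.Int.mod_eq_emod_of_pos h6,
      PySem.Int.floordiv_eq_ediv_of_pos h2]
    split_ifs with d1 d2 d3 <;> try omega
    have e1 : (num % 6 + 6) / 2 = num / 2 := by omega
    have e2 : num % 6 + 6 - num / 2 = num / 2 := by omega
    have e3 : (num / 6 - 1).toNat = 0 := by omega
    rw [e1, e2, e3]
    simp
  · -- 6 < num < 12, odd
    have h2 : (0:Int) < 2 := by norm_num
    have hm : num % 2 ≠ 0 := by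
      have := c4; simpa [PySem.Int.mod_eq_emod_of_pos h2] using this
    unfold culc_race_lane_alt
    have h6 : (0:Int) < 6 := by norm_num
    simp only [PySem.Int.floordiv_eq_ediv_of_pos h6, PySem.Int.mod_eq_emod_of_pos h6,
      PySem.Int.floordiv_eq_ediv_of_pos h2]
    split_ifs with d1 d2 d3 <;> try omega
    have e1 : (num % 6 + 6) / 2 = num / 2 := by omega
    have e2 : num % 6 + 6 - num / 2 = num / 2 + 1 := by omega
    have e3 : (num / 6 - 1).toNat = 0 := by omega
    rw [e1, e2, e3]
    simp
  · -- 0 < ... actually num ≠ 0, num < 12, num ≤ 6 (incl. negatives)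
    unfold culc_race_lane_alt
    split_ifs with d1 <;> first | omega | simp
  · -- num = 0
    have : num = 0 := by omega
    subst this
    simp [culc_race_lane_alt]
termination_by num.toNat
decreasing_by omega

-- ===== VERDICT (by name: the statement is the Claim_ definition above) =====
theorem culc_race_lane_spec : Claim_equal_culc_race_lane := by
  intro num _
  unfold Spec_culc_race_lane culc_race_lane
  rw [culcLoopA_eq, List.nil_append, List.reverse_reverse]
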